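-- pv_equiv track=rewrite | github.com/douzujun/Python-Foundation-Suda | 上机题目和面试题整理/Python-Foundation-Suda-master/03_本科编程题/04_期末题.py | func6
-- ===== SOURCE A (Python) =====
-- def func6(S,T):
--     import string
--     a = b = c = 0
--     for ch in string.ascii_lowercase:
--         if ch in S and ch in T:
--             a += 1
--         elif ch in S:
--             b += 1
--         elif ch in T:
--             c += 1
--     return (a,b,c)
-- ===== SOURCE B (Python) =====
-- def func6(S, T):
--     import string
--     sa = set(S) & set(string.ascii_lowercase)
--     sb = set(T) & set(string.ascii_lowercase)
--     return (len(sa & sb), len(sa - sb), len(sb - sa))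
-- ===== Notes on version B (the rewrite author's own statement) =====
-- stated objective: simpler
-- what changed: Replaces the 26-iteration loop with three-way if/elif branching by set algebra over the characters actually present: two lowercase-restricted sets and the sizes of their intersection and two differences.
import Mathlib
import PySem

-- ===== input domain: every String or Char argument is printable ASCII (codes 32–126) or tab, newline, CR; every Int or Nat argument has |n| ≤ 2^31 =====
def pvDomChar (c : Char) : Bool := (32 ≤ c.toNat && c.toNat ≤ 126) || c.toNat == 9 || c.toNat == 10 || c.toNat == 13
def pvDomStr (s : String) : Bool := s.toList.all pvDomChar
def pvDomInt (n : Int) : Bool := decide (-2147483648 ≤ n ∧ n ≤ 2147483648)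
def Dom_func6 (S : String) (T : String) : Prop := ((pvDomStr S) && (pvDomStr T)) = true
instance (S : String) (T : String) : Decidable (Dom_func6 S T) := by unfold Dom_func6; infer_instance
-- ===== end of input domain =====

-- B replaces A's 26-letter loop with three-way branching by set algebra (intersection/difference sizes); simpler, same behaviour.

-- string.ascii_lowercase, shared by both ports
def pvLowers : List Char :=
  ['a','b','c','d','e','f','g','h','i','j','k','l','m',
   'n','o','p','q','r','s','t','u','v','w','x','y','z']

-- ===== PORT A =====
-- 'ch in S' for a single character ch is exactly character membership in S
def func6 (S : String) (T : String) : Int × Int × Int :=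
  let s := S.toList
  let t := T.toList
  pvLowers.foldl
    (fun (acc : Int × Int × Int) ch =>
      if s.contains ch && t.contains ch then (acc.1 + 1, acc.2.1, acc.2.2)
      else if s.contains ch then (acc.1, acc.2.1 + 1, acc.2.2)
      else if t.contains ch then (acc.1, acc.2.1, acc.2.2 + 1)
      else acc)
    (0, 0, 0)

-- ===== PORT B =====
def func6_alt (S : String) (T : String) : Int × Int × Int :=
  let sa := PySem.Set.inter (PySem.Set.ofList S.toList) (PySem.Set.ofList pvLowers)
  let sb := PySem.Set.inter (PySem.Set.ofList T.toList) (PySem.Set.ofList pvLowers)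
  (PySem.Set.len (PySem.Set.inter sa sb),
   PySem.Set.len (PySem.Set.diff sa sb),
   PySem.Set.len (PySem.Set.diff sb sa))

-- ===== PRECONDITION & SPEC =====
def Spec_func6 (S : String) (T : String) (out : Int × Int × Int) : Prop := out = func6_alt S T
instance (S : String) (T : String) (out : Int × Int × Int) : Decidable (Spec_func6 S T out) := by unfold Spec_func6; infer_instance

-- ===== CLAIM (what is proved, stated in full; the proofs are below) =====
def Claim_equal_func6 : Prop := ∀ (S : String) (T : String), Dom_func6 S T → Spec_func6 S T (func6 S T)

-- ===== LEMMAS AND PROOFS =====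

theorem pvLowers_nodup : pvLowers.Nodup := by decide

/-- A's loop computes the three countP's over the alphabet. -/
theorem foldA (s t : List Char) (L : List Char) (a b c : Int) :
    L.foldl
      (fun (acc : Int × Int × Int) ch =>
        if s.contains ch && t.contains ch then (acc.1 + 1, acc.2.1, acc.2.2)
        else if s.contains ch then (acc.1, acc.2.1 + 1, acc.2.2)
        else if t.contains ch then (acc.1, acc.2.1, acc.2.2 + 1)
        else acc)
      (a, b, c)
    = (a + L.countP (fun ch => s.contains ch && t.contains ch),
       b + L.countP (fun ch => s.contains ch && !t.contains ch),
       c + L.countP (fun ch => !s.contains ch && t.contains ch)) := by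
  induction L generalizing a b c with
  | nil => simp
  | cons x L ih =>
    simp only [List.foldl_cons, List.countP_cons]
    cases hs : s.contains x <;> cases ht : t.contains x <;>
      simp only [hs, ht, Bool.and_self, Bool.and_true, Bool.and_false, Bool.true_and,
        Bool.false_and, Bool.not_true, Bool.not_false, if_true, if_false,
        Bool.false_eq_true, ite_true, ite_false] <;>
      rw [ih] <;> simp [Prod.ext_iff] <;> push_cast <;> omega

/-- A nodup list whose membership is 'in the alphabet and p' has length countP p over the alphabet. -/
theorem card_eq (l : List Char) (hn : l.Nodup) (p : Char → Bool)
    (hm : ∀ ch, ch ∈ l ↔ ch ∈ pvLowers ∧ p ch = true) :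
    l.length = pvLowers.countP p := by
  have hperm : l.Perm (pvLowers.filter p) :=
    (List.perm_ext_iff_of_nodup hn (List.Nodup.filter _ pvLowers_nodup)).2
      (fun ch => by simp [List.mem_filter, hm])
  rw [hperm.length_eq, List.countP_eq_length_filter]

-- ===== VERDICT (by name: the statement is the Claim_ definition above) =====
theorem func6_spec : Claim_equal_func6 := by
  intro S T _
  unfold Spec_func6 func6 func6_alt
  rw [foldA]
  have key : ∀ (l : List Char) (p : Char → Bool),
      l.Nodup → (∀ ch, ch ∈ l ↔ ch ∈ pvLowers ∧ p ch = true) →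
      PySem.Set.len l = ((pvLowers.countP p : Nat) : Int) := by
    intro l p hn hm
    simp [PySem.Set.len, card_eq l hn p hm]
  refine Prod.ext ?_ (Prod.ext ?_ ?_)
  · simp only []
    rw [key _ (fun ch => S.toList.contains ch && T.toList.contains ch)
        (PySem.Set.nodup_inter _ _ (PySem.Set.nodup_inter _ _ (PySem.Set.nodup_ofList _)))
        (fun ch => by
          simp [PySem.Set.mem_inter, PySem.Set.mem_ofList]
          tauto)]
    simp
  · simp only []
    rw [key _ (fun ch => S.toList.contains ch && !T.toList.contains ch)
        (PySem.Set.nodup_diff _ _ (PySem.Set.nodup_inter _ _ (PySem.Set.nodup_ofList _)))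
        (fun ch => by
          simp [PySem.Set.mem_diff, PySem.Set.mem_inter, PySem.Set.mem_ofList]
          tauto)]
    simp
  · simp only []
    rw [key _ (fun ch => !S.toList.contains ch && T.toList.contains ch)
        (PySem.Set.nodup_diff _ _ (PySem.Set.nodup_inter _ _ (PySem.Set.nodup_ofList _)))
        (fun ch => by
          simp [PySem.Set.mem_diff, PySem.Set.mem_inter, PySem.Set.mem_ofList]
          tauto)]
    simp
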